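-- pv_equiv track=rewrite | github.com/joroosen/adventofcode2020 | 24.py | get_tile_coordinates
-- ===== SOURCE A (Python) =====
-- def get_tile_coordinates(path):
--     # split strings in directions
--     directions = []
--     while len(path) > 0:
--         if path.startswith("se") or path.startswith("sw") or path.startswith("nw") or path.startswith("ne"):
--             directions.append(path[:2])
--             path = path[2:]
--         else:
--             directions.append(path[:1])
--             path = path[1:]
--
--     # move to tile coordinates
--     x = 0
--     y = 0
--     for step in directions:
--         if step == "e":
--             x += 1
--         elif step == "se":
--             y += 1
--         elif step == "sw":
--             y += 1
--             x -= 1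
--         elif step == "w":
--             x -= 1
--         elif step == "nw":
--             y -= 1
--         elif step == "ne":
--             x += 1
--             y -= 1
--     return[x,y]
-- ===== SOURCE B (Python) =====
-- def get_tile_coordinates(path):
--     # tokenize with an index cursor, then compute the answer as a
--     # closed-form linear combination of token counts (no per-step walk)
--     tokens = []
--     i = 0
--     n = len(path)
--     while i < n:
--         if path[i] in "sn" and path[i + 1:i + 2] in ("e", "w"):
--             tokens.append(path[i:i + 2])
--             i += 2
--         else:
--             tokens.append(path[i])
--             i += 1
--     c = tokens.count
--     return [c("e") - c("w") + c("ne") - c("sw"),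
--             c("se") + c("sw") - c("nw") - c("ne")]
-- ===== Notes on version B (the rewrite author's own statement) =====
-- stated objective: faster
-- what changed: B tokenizes with an index cursor instead of repeatedly re-slicing the remaining string and replaces the per-step branching walk by a closed-form linear combination of token counts.
import Mathlib
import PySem

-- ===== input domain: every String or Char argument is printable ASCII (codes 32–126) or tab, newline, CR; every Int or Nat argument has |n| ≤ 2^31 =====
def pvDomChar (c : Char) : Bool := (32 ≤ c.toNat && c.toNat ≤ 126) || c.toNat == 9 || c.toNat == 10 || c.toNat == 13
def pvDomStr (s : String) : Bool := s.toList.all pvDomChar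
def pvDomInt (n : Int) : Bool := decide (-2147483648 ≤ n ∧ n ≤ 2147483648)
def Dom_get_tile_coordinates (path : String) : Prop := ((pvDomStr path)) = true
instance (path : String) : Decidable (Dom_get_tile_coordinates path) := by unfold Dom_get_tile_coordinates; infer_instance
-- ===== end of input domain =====

-- B tokenizes with an index cursor instead of repeated slicing and computes the result as a
-- closed-form linear combination of token counts instead of a per-step walk; A re-slices the string each step (quadratic), B is linear (objective: faster, measured).

-- ===== PORT A =====
-- A's while-loop over the shrinking string, exact: startswith of the four two-char
-- directions, take the matched prefix, recurse on the rest (tokens kept as List Char).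
def pvTokA : List Char → List (List Char)
  | [] => []
  | [c] => [[c]]
  | c1 :: c2 :: rest =>
    if [c1, c2] = ['s', 'e'] ∨ [c1, c2] = ['s', 'w'] ∨ [c1, c2] = ['n', 'w'] ∨ [c1, c2] = ['n', 'e'] then
      [c1, c2] :: pvTokA rest
    else
      [c1] :: pvTokA (c2 :: rest)

-- A's for-loop body over one step
def pvStepA : (Int × Int) → List Char → Int × Int
  | (x, y), step =>
    if step = ['e'] then (x + 1, y)
    else if step = ['s', 'e'] then (x, y + 1)
    else if step = ['s', 'w'] then (x - 1, y + 1)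
    else if step = ['w'] then (x - 1, y)
    else if step = ['n', 'w'] then (x, y - 1)
    else if step = ['n', 'e'] then (x + 1, y - 1)
    else (x, y)

def get_tile_coordinates (path : String) : List Int :=
  let directions := pvTokA path.toList
  let p := directions.foldl pvStepA (0, 0)
  [p.1, p.2]

-- ===== PORT B =====
-- B's index-cursor tokenizer: two-char token iff current char ∈ "sn" and next char ∈ "ew"
def pvTokB : List Char → List (List Char)
  | [] => []
  | c :: rest =>
    if c = 's' ∨ c = 'n' then
      match rest with
      | [] => [[c]]
      | d :: rest' =>
        if d = 'e' ∨ d = 'w' then [c, d] :: pvTokB rest'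
        else [c] :: pvTokB (d :: rest')
    else
      [c] :: pvTokB rest

def get_tile_coordinates_alt (path : String) : List Int :=
  let toks := pvTokB path.toList
  let c : List Char → Int := fun t => (toks.count t : Int)
  [c ['e'] - c ['w'] + c ['n', 'e'] - c ['s', 'w'],
   c ['s', 'e'] + c ['s', 'w'] - c ['n', 'w'] - c ['n', 'e']]

-- ===== PRECONDITION & SPEC =====
def Spec_get_tile_coordinates (path : String) (out : List Int) : Prop := out = get_tile_coordinates_alt path
instance (path : String) (out : List Int) : Decidable (Spec_get_tile_coordinates path out) := by unfold Spec_get_tile_coordinates; infer_instance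

-- ===== CLAIM (what is proved, stated in full; the proofs are below) =====
def Claim_equal_get_tile_coordinates : Prop := ∀ (path : String), Dom_get_tile_coordinates path → Spec_get_tile_coordinates path (get_tile_coordinates path)

-- ===== LEMMAS AND PROOFS =====

theorem pvTok_eq : ∀ l : List Char, pvTokA l = pvTokB l
  | [] => rfl
  | [c] => by
    by_cases h1 : c = 's' <;> by_cases h2 : c = 'n' <;>
      simp [pvTokA, pvTokB, h1, h2]
  | c1 :: c2 :: rest => by
    have ih1 := pvTok_eq rest
    have ih2 := pvTok_eq (c2 :: rest)
    by_cases h1 : c1 = 's' <;> by_cases h2 : c1 = 'n' <;>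
      by_cases h3 : c2 = 'e' <;> by_cases h4 : c2 = 'w' <;>
        simp_all [pvTokA, pvTokB]

def pvCntX (ts : List (List Char)) : Int :=
  (ts.count ['e'] : Int) - ts.count ['w'] + ts.count ['n', 'e'] - ts.count ['s', 'w']

def pvCntY (ts : List (List Char)) : Int :=
  (ts.count ['s', 'e'] : Int) + ts.count ['s', 'w'] - ts.count ['n', 'w'] - ts.count ['n', 'e']

theorem pvFoldA (ts : List (List Char)) : ∀ x y : Int,
    ts.foldl pvStepA (x, y) = (x + pvCntX ts, y + pvCntY ts) := by
  induction ts with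
  | nil => intro x y; simp [pvCntX, pvCntY]
  | cons t ts ih =>
    intro x y
    simp only [List.foldl_cons, pvStepA]
    split_ifs with h1 h2 h3 h4 h5 h6 <;>
      simp_all [pvCntX, pvCntY] <;>
        first
          | (constructor <;> push_cast <;> ring)
          | (push_cast; ring)

-- ===== VERDICT (by name: the statement is the Claim_ definition above) =====
theorem get_tile_coordinates_spec : Claim_equal_get_tile_coordinates := by
  intro path _
  show _ = _
  simp only [get_tile_coordinates, get_tile_coordinates_alt, pvTok_eq, pvFoldA]
  simp [pvCntX, pvCntY]
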